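-- pv_equiv track=rewrite | github.com/rybushkindmitry/pjsua-for-sipssert | scripts/common.py | parse_sip_headers
-- ===== SOURCE A (Python) =====
-- def parse_sip_headers(whole_msg: str) -> list:
--     """
--     Parse SIP message text into list of (name, value) tuples.
--
--     - Skips the first line (request/status line)
--     - Handles header folding (continuation lines starting with space/tab)
--     - Stops at blank line (header/body separator)
--     """
--     # Normalize line endings
--     text = whole_msg.replace("\r\n", "\n").replace("\r", "\n")
--     lines = text.split("\n")
--
--     headers = []
--     current_name = None
--     current_value = None
--
--     # Skip first line (request/status line)
--     for line in lines[1:]: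
--         # Blank line = end of headers
--         if line == "":
--             break
--
--         # Continuation line (header folding)
--         if line and line[0] in (" ", "\t"):
--             if current_name is not None:
--                 current_value = current_value + " " + line.strip()
--             continue
--
--         # Save previous header
--         if current_name is not None:
--             headers.append((current_name, current_value))
--
--         # Parse new header
--         colon_pos = line.find(":")
--         if colon_pos > 0:
--             current_name = line[:colon_pos].strip()
--             current_value = line[colon_pos + 1:].strip()
--         else:
--             # Malformed line — skip
--             current_name = None
--             current_value = None
--
--     # Save last header
--     if current_name is not None:
--         headers.append((current_name, current_value))
--
--     return headers
-- ===== SOURCE B (Python) =====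
-- def parse_sip_headers(whole_msg: str) -> list:
--     """Parse SIP message text into list of (name, value) tuples.
--
--     Two-phase: group physical lines into logical headers, then parse each group.
--     """
--     text = whole_msg.replace("\r\n", "\n").replace("\r", "\n")
--     lines = text.split("\n")
--
--     # Phase 1: collect logical header groups (folded lines attached to their header)
--     groups = []
--     for line in lines[1:]:
--         if line == "":
--             break
--         if line[0] in (" ", "\t"):
--             if groups:
--                 groups[-1].append(line)
--         else:
--             groups.append([line])
--
--     # Phase 2: parse each group into a (name, value) tuple
--     headers = []
--     for group in groups:
--         first = group[0]
--         colon_pos = first.find(":")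
--         if colon_pos > 0:
--             name = first[:colon_pos].strip()
--             value = " ".join([first[colon_pos + 1:].strip()] + [cont.strip() for cont in group[1:]])
--             headers.append((name, value))
--     return headers
-- ===== Notes on version B (the rewrite author's own statement) =====
-- stated objective: alternative
-- what changed: Replaces A's single stateful loop (carrying current_name/current_value and flushing the pending header at each boundary) with a two-phase pipeline: first group physical lines into logical header groups, then map each group independently to a (name, value) tuple, joining individually-stripped folded segments.
import Mathlib
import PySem

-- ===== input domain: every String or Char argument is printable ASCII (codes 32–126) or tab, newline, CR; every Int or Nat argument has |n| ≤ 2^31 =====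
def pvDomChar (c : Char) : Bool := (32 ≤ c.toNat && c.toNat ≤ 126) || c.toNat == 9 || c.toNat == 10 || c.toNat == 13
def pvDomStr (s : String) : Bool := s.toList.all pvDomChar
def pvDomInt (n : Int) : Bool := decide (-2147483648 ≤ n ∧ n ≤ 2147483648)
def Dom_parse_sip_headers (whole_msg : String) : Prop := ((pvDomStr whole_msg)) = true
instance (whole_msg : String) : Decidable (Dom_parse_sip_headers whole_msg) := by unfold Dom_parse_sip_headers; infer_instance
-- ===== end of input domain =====

-- B re-decomposes A's single stateful loop into two phases (group physical lines into
-- logical headers, then parse each group); equal return value on all inputs (objective: alternative).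

-- ===== PORT A =====
-- 'line and line[0] in (" ", "\t")'
def pvA_isCont (l : String) : Bool :=
  (l != "") && (PySem.Str.pyGet? l 0 == some ' ' || PySem.Str.pyGet? l 0 == some '\t')

-- the 'for line in lines[1:]' loop with state (headers, current_name/current_value);
-- the trailing 'if current_name is not None: headers.append(...)' is the base / break case
def pvA_loop : List String → List (String × String) → Option (String × String) → List (String × String)
  | [], hs, cur => hs ++ cur.toList
  | l :: ls, hs, cur =>
    if l = "" then hs ++ cur.toList
    else if pvA_isCont l then
      match cur with
      | some (n, v) => pvA_loop ls hs (some (n, v ++ " " ++ PySem.Str.strip l))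
      | none => pvA_loop ls hs none
    else
      let hs' := hs ++ cur.toList
      let cp := PySem.Str.find l ":"
      if cp > 0 then
        pvA_loop ls hs' (some (PySem.Str.strip (PySem.Str.slice l none (some cp)),
                               PySem.Str.strip (PySem.Str.slice l (some (cp + 1)) none)))
      else
        pvA_loop ls hs' none

def parse_sip_headers (whole_msg : String) : List (String × String) :=
  let text := PySem.Str.replace (PySem.Str.replace whole_msg "\r\n" "\n") "\r" "\n"
  let lines := (PySem.Str.split? text "\n").getD []   -- sep "\n" ≠ "", so split? is always some
  pvA_loop (lines.drop 1) [] none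

-- ===== PORT B =====
-- 'line[0] in (" ", "\t")' (line is non-blank at this point)
def pvB_isCont (l : String) : Bool :=
  PySem.Str.pyGet? l 0 == some ' ' || PySem.Str.pyGet? l 0 == some '\t'

-- phase 1: the grouping loop ('groups[-1].append(line)' = rewrite the last group)
def pvB_group : List String → List (List String) → List (List String)
  | [], gs => gs
  | l :: ls, gs =>
    if l = "" then gs
    else if pvB_isCont l then
      if gs.isEmpty then pvB_group ls gs
      else pvB_group ls (gs.dropLast ++ [gs.getLast! ++ [l]])
    else
      pvB_group ls (gs ++ [[l]])

-- phase 2: one group → one (name, value) tuple, or nothing if malformed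
def pvB_parseGroup : List String → Option (String × String)
  | [] => none
  | first :: rest =>
    let cp := PySem.Str.find first ":"
    if cp > 0 then
      some (PySem.Str.strip (PySem.Str.slice first none (some cp)),
            PySem.Str.join " "
              (PySem.Str.strip (PySem.Str.slice first (some (cp + 1)) none) :: rest.map PySem.Str.strip))
    else none

def parse_sip_headers_alt (whole_msg : String) : List (String × String) :=
  let text := PySem.Str.replace (PySem.Str.replace whole_msg "\r\n" "\n") "\r" "\n"
  let lines := (PySem.Str.split? text "\n").getD []   -- sep "\n" ≠ "", so split? is always some
  (pvB_group (lines.drop 1) []).filterMap pvB_parseGroup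

-- ===== PRECONDITION & SPEC =====
def Spec_parse_sip_headers (whole_msg : String) (out : List (String × String)) : Prop := out = parse_sip_headers_alt whole_msg
instance (whole_msg : String) (out : List (String × String)) : Decidable (Spec_parse_sip_headers whole_msg out) := by unfold Spec_parse_sip_headers; infer_instance

-- ===== CLAIM (what is proved, stated in full; the proofs are below) =====
def Claim_equal_parse_sip_headers : Prop := ∀ (whole_msg : String), Dom_parse_sip_headers whole_msg → Spec_parse_sip_headers whole_msg (parse_sip_headers whole_msg)

-- ===== LEMMAS AND PROOFS =====

theorem pv_join_singleton (x : String) : PySem.Str.join " " [x] = x := by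
  rw [← String.toList_inj]
  simp [PySem.Str.toList_join, PySem.Chars.join_singleton]

theorem pv_chars_join_concat (sep p : List Char) (ps : List (List Char)) (q : List Char) :
    PySem.Chars.join sep (p :: (ps ++ [q])) = PySem.Chars.join sep (p :: ps) ++ sep ++ q := by
  induction ps generalizing p with
  | nil => simp [PySem.Chars.join_cons_cons, PySem.Chars.join_singleton]
  | cons r rs ih =>
      rw [List.cons_append, PySem.Chars.join_cons_cons, ih r, PySem.Chars.join_cons_cons]
      simp [List.append_assoc]

theorem pv_join_concat (x : String) (xs : List String) (y : String) :
    PySem.Str.join " " (x :: (xs ++ [y])) = PySem.Str.join " " (x :: xs) ++ " " ++ y := by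
  rw [← String.toList_inj]
  simp only [PySem.Str.toList_join, String.toList_append, List.map_cons, List.map_append,
    List.map_nil]
  rw [pv_chars_join_concat]

theorem pv_parseGroup_concat (g : List String) (l : String) (hg : g ≠ []) :
    pvB_parseGroup (g ++ [l]) =
      (pvB_parseGroup g).map (fun p => (p.1, p.2 ++ " " ++ PySem.Str.strip l)) := by
  cases g with
  | nil => exact absurd rfl hg
  | cons first rest =>
      simp only [List.cons_append, pvB_parseGroup, List.map_append, List.map_cons, List.map_nil]
      split
      · rw [pv_join_concat]; simp
      · simp

theorem pv_parseGroup_single (l : String) :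
    pvB_parseGroup [l] =
      (if PySem.Str.find l ":" > 0 then
        some (PySem.Str.strip (PySem.Str.slice l none (some (PySem.Str.find l ":"))),
              PySem.Str.strip (PySem.Str.slice l (some (PySem.Str.find l ":" + 1)) none))
       else none) := by
  simp only [pvB_parseGroup, List.map_nil, pv_join_singleton]

-- step lemmas: one iteration of each loop, in constructor form
theorem pvA_step_blank (ls : List String) (hs : List (String × String))
    (cur : Option (String × String)) : pvA_loop ("" :: ls) hs cur = hs ++ cur.toList := by
  rw [pvA_loop.eq_def]; simp

theorem pvA_step_cont_none {l : String} (hb : l ≠ "") (hc : pvA_isCont l = true)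
    (ls : List String) (hs : List (String × String)) :
    pvA_loop (l :: ls) hs none = pvA_loop ls hs none := by
  rw [pvA_loop.eq_def]; simp [hb, hc]

theorem pvA_step_cont_some {l : String} (hb : l ≠ "") (hc : pvA_isCont l = true)
    (ls : List String) (hs : List (String × String)) (n v : String) :
    pvA_loop (l :: ls) hs (some (n, v)) =
      pvA_loop ls hs (some (n, v ++ " " ++ PySem.Str.strip l)) := by
  rw [pvA_loop.eq_def]; simp [hb, hc]

theorem pvA_step_new {l : String} (hb : l ≠ "") (hc : pvA_isCont l = false)
    (ls : List String) (hs : List (String × String)) (cur : Option (String × String)) :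
    pvA_loop (l :: ls) hs cur =
      pvA_loop ls (hs ++ cur.toList)
        (if PySem.Str.find l ":" > 0 then
          some (PySem.Str.strip (PySem.Str.slice l none (some (PySem.Str.find l ":"))),
                PySem.Str.strip (PySem.Str.slice l (some (PySem.Str.find l ":" + 1)) none))
         else none) := by
  rw [pvA_loop.eq_def]; simp [hb, hc]; split_ifs <;> rfl

theorem pvB_step_blank (ls : List String) (gs : List (List String)) :
    pvB_group ("" :: ls) gs = gs := by
  rw [pvB_group]; simp

theorem pvB_step_cont_nil {l : String} (hb : l ≠ "") (hc : pvB_isCont l = true)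
    (ls : List String) : pvB_group (l :: ls) [] = pvB_group ls [] := by
  rw [pvB_group, if_neg hb, if_pos hc]; simp

theorem pvB_step_cont_concat {l : String} (hb : l ≠ "") (hc : pvB_isCont l = true)
    (ls : List String) (init : List (List String)) (a : List String) :
    pvB_group (l :: ls) (init ++ [a]) = pvB_group ls (init ++ [a ++ [l]]) := by
  rw [pvB_group, if_neg hb, if_pos hc]
  have hne : (init ++ [a]).isEmpty = false := by simp
  rw [hne]
  simp only [Bool.false_eq_true, if_false, List.dropLast_concat,
    List.getLast!_eq_getLast?_getD, List.getLast?_concat, Option.getD_some]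

theorem pvB_step_new {l : String} (hb : l ≠ "") (hc : pvB_isCont l = false)
    (ls : List String) (gs : List (List String)) :
    pvB_group (l :: ls) gs = pvB_group ls (gs ++ [[l]]) := by
  rw [pvB_group, if_neg hb, hc]
  simp

theorem pv_group_prefix (ls : List String) :
    ∀ (pre gs : List (List String)), gs ≠ [] →
      pvB_group ls (pre ++ gs) = pre ++ pvB_group ls gs := by
  induction ls with
  | nil => intro pre gs _; simp [pvB_group]
  | cons l ls ih =>
      intro pre gs hgs
      rcases List.eq_nil_or_concat gs with rfl | ⟨init, a, rfl⟩
      · exact absurd rfl hgs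
      simp only [List.concat_eq_append]
      by_cases hb : l = ""
      · subst hb; rw [pvB_step_blank, pvB_step_blank]
      by_cases hc : pvB_isCont l = true
      · rw [← List.append_assoc, pvB_step_cont_concat hb hc, pvB_step_cont_concat hb hc,
          List.append_assoc]
        exact ih pre (init ++ [a ++ [l]]) (by simp)
      · have hc' : pvB_isCont l = false := by simpa using hc
        rw [pvB_step_new hb hc', pvB_step_new hb hc', List.append_assoc, List.append_assoc]
        exact ih pre (init ++ ([a] ++ [[l]])) (by simp)

theorem pv_main (ls : List String) :
    ∀ (hs : List (String × String)) (og : Option (List String)), og ≠ some [] →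
      pvA_loop ls hs (og.bind pvB_parseGroup) =
        hs ++ (pvB_group ls (og.elim [] (fun g => [g]))).filterMap pvB_parseGroup := by
  induction ls with
  | nil =>
      intro hs og _
      cases og with
      | none => simp [pvA_loop, pvB_group]
      | some g => cases h : pvB_parseGroup g <;> simp [pvA_loop, pvB_group, h]
  | cons l ls ih =>
      intro hs og hog
      by_cases hblank : l = ""
      · subst hblank
        rw [pvA_step_blank, pvB_step_blank]
        cases og with
        | none => simp
        | some g => cases h : pvB_parseGroup g <;> simp [h]
      · have hAB : pvA_isCont l = pvB_isCont l := by
          simp [pvA_isCont, pvB_isCont, hblank]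
        by_cases hcont : pvB_isCont l = true
        · -- continuation line
          have hA : pvA_isCont l = true := by rw [hAB]; exact hcont
          cases og with
          | none =>
              simp only [Option.bind_none, Option.elim]
              rw [pvA_step_cont_none hblank hA, pvB_step_cont_nil hblank hcont]
              simpa using ih hs none (by simp)
          | some g =>
              have hg : g ≠ [] := fun h => hog (by rw [h])
              simp only [Option.bind_some, Option.elim]
              have hBg : ([g] : List (List String)) = [] ++ [g] := by simp
              rw [hBg, pvB_step_cont_concat hblank hcont, List.nil_append]
              have hstep := ih hs (some (g ++ [l])) (by simp)
              simp only [Option.bind_some, Option.elim] at hstep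
              rw [pv_parseGroup_concat g l hg] at hstep
              cases h : pvB_parseGroup g with
              | none =>
                  rw [h, Option.map_none] at hstep
                  rw [pvA_step_cont_none hblank hA]
                  exact hstep
              | some p =>
                  obtain ⟨n, v⟩ := p
                  rw [h, Option.map_some] at hstep
                  rw [pvA_step_cont_some hblank hA]
                  simpa using hstep
        · -- new header line
          have hBc : pvB_isCont l = false := by simpa using hcont
          have hAc : pvA_isCont l = false := by rw [hAB]; exact hBc
          rw [pvA_step_new hblank hAc]
          have hnew := ih (hs ++ (og.bind pvB_parseGroup).toList) (some [l]) (by simp)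
          simp only [Option.bind_some, Option.elim] at hnew
          rw [pv_parseGroup_single] at hnew
          cases og with
          | none =>
              simp only [Option.bind_none, Option.toList_none, List.append_nil] at hnew ⊢
              simp only [Option.elim]
              rw [pvB_step_new hblank hBc, List.nil_append]
              exact hnew
          | some g =>
              simp only [Option.elim]
              rw [pvB_step_new hblank hBc,
                pv_group_prefix ls [g] [[l]] (by simp), List.filterMap_append]
              have hone : ([g] : List (List String)).filterMap pvB_parseGroup
                  = ((some g).bind pvB_parseGroup).toList := by
                cases h : pvB_parseGroup g <;> simp [h]
              rw [hone, ← List.append_assoc]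
              exact hnew

-- ===== VERDICT (by name: the statement is the Claim_ definition above) =====
theorem parse_sip_headers_spec : Claim_equal_parse_sip_headers := by
  intro whole_msg _
  unfold Spec_parse_sip_headers parse_sip_headers parse_sip_headers_alt
  have := pv_main ((((PySem.Str.split? (PySem.Str.replace (PySem.Str.replace whole_msg "\r\n" "\n") "\r" "\n") "\n").getD []).drop 1)) [] none (by simp)
  simpa using this
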